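-- pv_equiv track=rewrite | github.com/zacmcnulty123/Python-Udemy-Lectures | Function_exercises/summer_of_69.py | summer_of_69
-- ===== SOURCE A (Python) =====
-- def summer_of_69(a):
--     result = 0
--     add = True
--     for i in a:
--         if i == 6:
--             add = False
--         elif add == True:
--             result = result + i
--         elif add == False and i == 9:
--             add = True
--     return result
-- ===== SOURCE B (Python) =====
-- def summer_of_69(a):
--     total = 0
--     rest = a
--     while True:
--         if 6 in rest:
--             i = rest.index(6)
--             total += sum(rest[:i])
--             rest = rest[i + 1:]
--             if 9 in rest:
--                 rest = rest[rest.index(9) + 1:]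
--             else:
--                 break
--         else:
--             total += sum(rest)
--             break
--     return total
-- ===== Notes on version B (the rewrite author's own statement) =====
-- stated objective: alternative
-- what changed: Replaced A's per-element add/skip boolean flag with a cursor loop that finds segment boundaries via `in`/`.index` and sums whole slices between a 9-terminator and the next 6 in bulk.
import Mathlib
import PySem

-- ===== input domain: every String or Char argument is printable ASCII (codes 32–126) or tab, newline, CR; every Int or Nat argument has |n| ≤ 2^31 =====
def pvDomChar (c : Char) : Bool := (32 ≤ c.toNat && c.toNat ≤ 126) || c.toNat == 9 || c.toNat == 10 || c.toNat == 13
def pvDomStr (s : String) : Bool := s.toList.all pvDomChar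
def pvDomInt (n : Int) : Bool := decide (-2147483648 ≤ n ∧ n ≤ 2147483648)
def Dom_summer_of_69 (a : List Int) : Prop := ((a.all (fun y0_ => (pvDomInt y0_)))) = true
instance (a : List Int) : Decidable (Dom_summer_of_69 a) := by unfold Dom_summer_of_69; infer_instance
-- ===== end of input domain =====

-- B replaces A's per-element add/skip flag by bulk slice sums between segment
-- boundaries found with `in`/`.index` (objective: alternative decomposition).

-- ===== PORT A =====
-- per-element loop carrying (result, add)
def summer_of_69 (a : List Int) : Int :=
  (a.foldl (fun (s : Int × Bool) i =>
      if i == 6 then (s.1, false)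
      else if s.2 == true then (s.1 + i, s.2)
      else if s.2 == false && i == 9 then (s.1, true)
      else s) ((0 : Int), true)).1

-- ===== PORT B =====
-- the while loop of Source B, as recursion on the shrinking suffix `rest`;
-- `rest.index(6)` on a list containing 6 is exactly List.idxOf
def summer_of_69_altLoop (rest : List Int) (total : Int) : Int :=
  if h : (6 : Int) ∈ rest then
    let i := rest.idxOf 6                     -- rest.index(6)
    let total' := total + (rest.take i).sum   -- total += sum(rest[:i])
    let rest' := rest.drop (i + 1)            -- rest = rest[i+1:]
    if (9 : Int) ∈ rest' then
      summer_of_69_altLoop (rest'.drop (rest'.idxOf 9 + 1)) total'  -- rest = rest[rest.index(9)+1:]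
    else total'
  else total + rest.sum                       -- total += sum(rest); break
termination_by rest.length
decreasing_by
  have h0 : 0 < rest.length := List.length_pos_of_mem h
  simp only [List.length_drop]
  omega

def summer_of_69_alt (a : List Int) : Int := summer_of_69_altLoop a 0

-- ===== PRECONDITION & SPEC =====
def Spec_summer_of_69 (a : List Int) (out : Int) : Prop := out = summer_of_69_alt a
instance (a : List Int) (out : Int) : Decidable (Spec_summer_of_69 a out) := by unfold Spec_summer_of_69; infer_instance

-- ===== CLAIM (what is proved, stated in full; the proofs are below) =====
def Claim_equal_summer_of_69 : Prop := ∀ (a : List Int), Dom_summer_of_69 a → Spec_summer_of_69 a (summer_of_69 a)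

-- ===== LEMMAS AND PROOFS =====

-- A's loop body
def pvStepA (s : Int × Bool) (i : Int) : Int × Bool :=
  if i == 6 then (s.1, false)
  else if s.2 == true then (s.1 + i, s.2)
  else if s.2 == false && i == 9 then (s.1, true)
  else s

-- what altLoop does while the flag is off: skip to just past the first 9, then resume
def pvSkip (rest : List Int) (total : Int) : Int :=
  if (9 : Int) ∈ rest then summer_of_69_altLoop (rest.drop (rest.idxOf 9 + 1)) total else total

theorem altLoop_nil (total : Int) : summer_of_69_altLoop [] total = total := by
  rw [summer_of_69_altLoop]; simp

theorem altLoop_cons_six (xs : List Int) (total : Int) :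
    summer_of_69_altLoop (6 :: xs) total = pvSkip xs total := by
  rw [summer_of_69_altLoop, pvSkip]; simp

theorem altLoop_cons_ne (x : Int) (xs : List Int) (total : Int) (hx : x ≠ 6) :
    summer_of_69_altLoop (x :: xs) total = summer_of_69_altLoop xs (total + x) := by
  rw [summer_of_69_altLoop]
  by_cases h6 : (6 : Int) ∈ xs
  · have hmem : (6 : Int) ∈ x :: xs := List.mem_cons_of_mem _ h6
    rw [summer_of_69_altLoop]
    simp only [hmem, h6, dif_pos]
    have hidx : (x :: xs).idxOf 6 = xs.idxOf 6 + 1 := by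
      simp [hx]
    rw [hidx]
    simp [List.take_succ_cons, List.drop_succ_cons, add_assoc]
  · have hmem : (6 : Int) ∉ x :: xs := by simp [Ne.symm hx, h6]
    rw [summer_of_69_altLoop]
    simp only [hmem, h6, dif_neg, not_false_iff]
    simp [add_assoc]

theorem pv_main (n : Nat) : ∀ (rest : List Int), rest.length ≤ n → ∀ (total : Int),
    ((rest.foldl pvStepA (total, true)).1 = summer_of_69_altLoop rest total ∧
     (rest.foldl pvStepA (total, false)).1 = pvSkip rest total) := by
  induction n with
  | zero =>
    intro rest hlen total
    have : rest = [] := List.eq_nil_of_length_eq_zero (Nat.le_zero.mp hlen)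
    subst this
    simp [altLoop_nil, pvSkip]
  | succ n ih =>
    intro rest hlen total
    cases rest with
    | nil => simp [altLoop_nil, pvSkip]
    | cons x xs =>
      have hxs : xs.length ≤ n := by simpa using Nat.lt_succ_iff.mp (Nat.lt_of_lt_of_le (by simp) hlen)
      constructor
      · by_cases hx : x = 6
        · subst hx
          rw [altLoop_cons_six]
          simpa [List.foldl_cons, pvStepA] using (ih xs hxs total).2
        · rw [altLoop_cons_ne x xs total hx]
          have : pvStepA (total, true) x = (total + x, true) := by
            simp [pvStepA, hx]
          rw [List.foldl_cons, this]
          exact (ih xs hxs (total + x)).1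
      · by_cases hx : x = 6
        · subst hx
          have hstep : pvStepA (total, false) 6 = (total, false) := by simp [pvStepA]
          rw [List.foldl_cons, hstep]
          have h2 := (ih xs hxs total).2
          rw [h2]
          unfold pvSkip
          by_cases h9 : (9 : Int) ∈ xs
          · have hmem : (9 : Int) ∈ (6 : Int) :: xs := List.mem_cons_of_mem _ h9
            have hidx : ((6 : Int) :: xs).idxOf 9 = xs.idxOf 9 + 1 := by
              simp
            simp [h9, hmem, hidx, List.drop_succ_cons]
          · have hmem : (9 : Int) ∉ (6 : Int) :: xs := by simp [h9]
            simp [h9, hmem]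
        · by_cases h9 : x = 9
          · subst h9
            have hstep : pvStepA (total, false) 9 = (total, true) := by simp [pvStepA]
            rw [List.foldl_cons, hstep]
            have h1 := (ih xs hxs total).1
            rw [h1]
            unfold pvSkip
            have hmem : (9 : Int) ∈ (9 : Int) :: xs := List.mem_cons_self
            simp [hmem]
          · have hstep : pvStepA (total, false) x = (total, false) := by
              simp [pvStepA, hx, h9]
            rw [List.foldl_cons, hstep]
            have h2 := (ih xs hxs total).2
            rw [h2]
            unfold pvSkip
            by_cases h9m : (9 : Int) ∈ xs
            · have hmem : (9 : Int) ∈ x :: xs := List.mem_cons_of_mem _ h9m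
              have hidx : (x :: xs).idxOf 9 = xs.idxOf 9 + 1 := by
                simp [h9]
              simp [h9m, hmem, hidx, List.drop_succ_cons]
            · have hmem : (9 : Int) ∉ x :: xs := by simp [Ne.symm h9, h9m]
              simp [h9m, hmem]

-- ===== VERDICT (by name: the statement is the Claim_ definition above) =====
theorem summer_of_69_spec : Claim_equal_summer_of_69 := by
  intro a _
  unfold Spec_summer_of_69 summer_of_69 summer_of_69_alt
  exact ((pv_main a.length a le_rfl 0).1).trans rfl
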